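-- pv_equiv track=rewrite | github.com/Mot0511/Ziper | main.py | cutToName
-- ===== SOURCE A (Python) =====
-- def cutToName(string):
--     while True:
--         if '/' in string:
--             string = string.partition('/')[2]
--
--         else:
--             break
--
--     string = string[:-4]
--     return string
-- ===== SOURCE B (Python) =====
-- def cutToName(string):
--     idx = string.rfind('/')
--     tail = string[idx+1:]
--     return tail[:-4]
-- ===== Notes on version B (the rewrite author's own statement) =====
-- stated objective: idiomatic
-- what changed: The while-loop that repeatedly front-partitions on the slash character is replaced by a single rfind locating the last slash, slicing the tail after it, then the same blind drop of the final four characters.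
import Mathlib
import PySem

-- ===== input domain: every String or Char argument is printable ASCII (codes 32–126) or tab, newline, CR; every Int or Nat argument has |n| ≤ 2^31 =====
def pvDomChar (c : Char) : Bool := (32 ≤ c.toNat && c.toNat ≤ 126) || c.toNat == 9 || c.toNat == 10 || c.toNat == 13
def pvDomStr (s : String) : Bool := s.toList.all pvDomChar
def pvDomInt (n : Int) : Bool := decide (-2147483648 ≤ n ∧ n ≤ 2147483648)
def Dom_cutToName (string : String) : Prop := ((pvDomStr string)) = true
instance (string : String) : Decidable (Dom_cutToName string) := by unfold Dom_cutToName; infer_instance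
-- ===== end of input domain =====

-- B replaces A's repeated front-partition loop on '/' by one rfind of the last slash (idiomatic; same values).

-- ===== PORT A =====
-- A's while-loop over the string's code points; string.partition('/')[2] (with '/' present,
-- as the branch guarantees) is ported exactly as the slice after the first occurrence:
-- string[string.find('/')+1:].
def cutToNameLoop (cs : List Char) : List Char :=
  if h : PySem.Chars.isIn ['/'] cs then
    cutToNameLoop (PySem.Chars.slice cs (some (PySem.Chars.find cs ['/'] + 1)) none)
  else cs
termination_by cs.length
decreasing_by
  have hinf : ['/'] <:+: cs := (PySem.Chars.isIn_iff_infix _ _).mp h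
  have hf : 0 ≤ PySem.Chars.find cs ['/'] := (PySem.Chars.find_nonneg_iff _ _).mpr hinf
  have hne : cs ≠ [] := by
    rintro rfl; simpa using hinf.sublist.length_le
  rw [PySem.Chars.slice_eq_listSlice, PySem.List.slice_from cs (by omega)]
  have h2 := List.length_pos_iff.mpr hne
  simp [List.length_drop]; omega

def cutToName (string : String) : String :=
  String.ofList (PySem.Chars.slice (cutToNameLoop string.toList) none (some (-4)))

-- ===== PORT B =====
def cutToName_alt (string : String) : String :=
  let idx := PySem.Str.rfind string "/"
  let tail := PySem.Str.slice string (some (idx + 1)) none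
  PySem.Str.slice tail none (some (-4))

-- ===== PRECONDITION & SPEC =====
def Spec_cutToName (string : String) (out : String) : Prop := out = cutToName_alt string
instance (string : String) (out : String) : Decidable (Spec_cutToName string out) := by unfold Spec_cutToName; infer_instance

-- ===== CLAIM (what is proved, stated in full; the proofs are below) =====
def Claim_equal_cutToName : Prop := ∀ (string : String), Dom_cutToName string → Spec_cutToName string (cutToName string)

-- ===== LEMMAS AND PROOFS =====

-- ['/'] is a prefix of l iff l starts with '/'.
theorem prefix_slash (l : List Char) : ['/'].isPrefixOf l = true ↔ l[0]? = some '/' := by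
  cases l with
  | nil => decide
  | cons x t => simp [List.isPrefixOf]; exact eq_comm

theorem infix_slash (cs : List Char) : ['/'] <:+: cs ↔ '/' ∈ cs := by
  constructor
  · rintro ⟨u, v, rfl⟩; simp
  · intro h
    obtain ⟨p, q, rfl⟩ := List.append_of_mem h
    exact ⟨p, q, by simp⟩

-- rfind.go returns -1 when no position ≤ j carries a slash
theorem go_neg (cs : List Char) : ∀ j : Nat, (∀ i ≤ j, cs[i]? ≠ some '/') →
    PySem.Chars.rfind.go cs ['/'] j = -1 := by
  intro j
  induction j with
  | zero =>
    intro h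
    rw [PySem.Chars.rfind.go]
    have h0 := h 0 (le_refl 0)
    simp [show ¬ (['/'].isPrefixOf cs = true) by rw [prefix_slash]; exact h0]
  | succ j ih =>
    intro h
    rw [PySem.Chars.rfind.go]
    have h1 := h (j+1) (le_refl _)
    have hnp : ¬ (['/'].isPrefixOf (cs.drop (j+1)) = true) := by
      rw [prefix_slash]; simpa using h1
    simp only [hnp]
    exact ih (fun i hi => h i (by omega))

-- rfind.go returns the highest slash position k ≤ j
theorem go_eq (cs : List Char) (k : Nat) : ∀ j : Nat, cs[k]? = some '/' → k ≤ j →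
    (∀ i, k < i → i ≤ j → cs[i]? ≠ some '/') →
    PySem.Chars.rfind.go cs ['/'] j = (k : Int) := by
  intro j
  induction j with
  | zero =>
    intro hk hkj _
    have hk0 : k = 0 := by omega
    subst hk0
    rw [PySem.Chars.rfind.go]
    simp [show ['/'].isPrefixOf cs = true by rw [prefix_slash]; exact hk]
  | succ j ih =>
    intro hk hkj hno
    rw [PySem.Chars.rfind.go]
    by_cases hkj' : k = j + 1
    · subst hkj'
      simp [show ['/'].isPrefixOf (cs.drop (j+1)) = true by
        rw [prefix_slash]; simpa using hk]
    · have hklt : k ≤ j := by omega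
      have hnp : ¬ (['/'].isPrefixOf (cs.drop (j+1)) = true) := by
        rw [prefix_slash]; simpa using hno (j+1) (by omega) (le_refl _)
      simp only [hnp]
      exact ih hk hklt (fun i hi hij => hno i hi (by omega))

theorem rfind_not_mem (cs : List Char) (h : '/' ∉ cs) : PySem.Chars.rfind cs ['/'] = -1 := by
  unfold PySem.Chars.rfind
  exact go_neg cs cs.length (fun i _ hi => h (by
    obtain ⟨hlt, he⟩ := List.getElem?_eq_some_iff.mp hi
    exact he ▸ List.getElem_mem hlt))

theorem rfind_split (a b : List Char) (hb : '/' ∉ b) :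
    PySem.Chars.rfind (a ++ '/' :: b) ['/'] = (a.length : Int) := by
  unfold PySem.Chars.rfind
  apply go_eq
  · simp
  · simp
  · intro i hi _ hsome
    have hget : ('/' :: b)[i - a.length]? = some '/' := by
      rwa [List.getElem?_append_right (by omega)] at hsome
    rw [show i - a.length = (i - a.length - 1) + 1 by omega] at hget
    simp only [List.getElem?_cons_succ] at hget
    exact hb (by
      obtain ⟨hlt2, he⟩ := List.getElem?_eq_some_iff.mp hget
      exact he ▸ List.getElem_mem hlt2)

-- one unfold of the A-loop when a slash is present
theorem loop_step (cs : List Char) (h : PySem.Chars.isIn ['/'] cs = true) :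
    cutToNameLoop cs
      = cutToNameLoop (PySem.Chars.slice cs (some (PySem.Chars.find cs ['/'] + 1)) none) := by
  rw [cutToNameLoop]; rw [dif_pos h]

theorem loop_not_mem (cs : List Char) (h : '/' ∉ cs) : cutToNameLoop cs = cs := by
  rw [cutToNameLoop]
  rw [dif_neg (by rw [PySem.Chars.isIn_iff_infix, infix_slash]; exact h)]

theorem loop_split (n : Nat) : ∀ (a b : List Char), a.length ≤ n → '/' ∉ b →
    cutToNameLoop (a ++ '/' :: b) = b := by
  induction n with
  | zero =>
    intro a b ha hb
    have ha0 : a = [] := List.eq_nil_of_length_eq_zero (by omega)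
    subst ha0
    simp only [List.nil_append]
    rw [loop_step _ (by rw [PySem.Chars.isIn_iff_infix, infix_slash]; simp)]
    have hf : PySem.Chars.find ('/' :: b) ['/'] = 0 := by
      have h0 : 0 ≤ PySem.Chars.find ('/' :: b) ['/'] := by
        rw [PySem.Chars.find_nonneg_iff, infix_slash]; simp
      obtain ⟨_, hmin⟩ := PySem.Chars.find_spec h0
      by_contra hne
      exact hmin 0 (by omega) ⟨b, by simp⟩
    rw [hf]
    rw [PySem.Chars.slice_eq_listSlice, PySem.List.slice_from _ (by norm_num)]
    simpa using loop_not_mem b hb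
  | succ n ih =>
    intro a b ha hb
    have hmem : '/' ∈ a ++ '/' :: b := by simp
    have hin : PySem.Chars.isIn ['/'] (a ++ '/' :: b) = true := by
      rw [PySem.Chars.isIn_iff_infix, infix_slash]; exact hmem
    rw [loop_step _ hin]
    set f := PySem.Chars.find (a ++ '/' :: b) ['/'] with hfdef
    have h0 : 0 ≤ f := by
      rw [hfdef, PySem.Chars.find_nonneg_iff, infix_slash]; exact hmem
    obtain ⟨hpre, hmin⟩ := PySem.Chars.find_spec h0
    rw [PySem.Chars.slice_eq_listSlice, PySem.List.slice_from _ (by omega)]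
    have htn : (f + 1).toNat = f.toNat + 1 := by omega
    have hle : f.toNat ≤ a.length := by
      by_contra hgt
      exact hmin a.length (by omega) ⟨b, by simp⟩
    rw [htn]
    by_cases hcase : f.toNat = a.length
    · rw [hcase]
      rw [show (a ++ '/' :: b).drop (a.length + 1) = b by simp [List.drop_append]]
      exact loop_not_mem b hb
    · have hlt : f.toNat + 1 ≤ a.length := by omega
      rw [List.drop_append_of_le_length hlt]
      exact ih (a.drop (f.toNat + 1)) b (by simp [List.length_drop]; omega) hb

theorem loop_eq_rfind (cs : List Char) :
    cutToNameLoop cs = cs.drop (PySem.Chars.rfind cs ['/'] + 1).toNat := by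
  by_cases h : '/' ∈ cs
  · obtain ⟨p, q, hpq, hp⟩ := List.eq_append_cons_of_mem (by simpa using h :
      '/' ∈ cs.reverse)
    have hcs : cs = q.reverse ++ '/' :: p.reverse := by
      have h2 := congrArg List.reverse hpq
      simpa using h2
    have hnp : '/' ∉ p.reverse := by simpa using hp
    rw [hcs, rfind_split _ _ hnp,
        loop_split q.reverse.length q.reverse p.reverse (le_refl _) hnp]
    rw [show ((q.reverse.length : Int) + 1).toNat = q.reverse.length + 1 by omega]
    rw [show (q.reverse ++ '/' :: p.reverse).drop (q.reverse.length + 1) = p.reverse by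
      simp [List.drop_append]]
  · rw [loop_not_mem cs h, rfind_not_mem cs h]
    simp

theorem go_ge_neg_one (cs sub : List Char) : ∀ j : Nat, -1 ≤ PySem.Chars.rfind.go cs sub j := by
  intro j
  induction j with
  | zero => rw [PySem.Chars.rfind.go]; split_ifs <;> norm_num
  | succ j ih => rw [PySem.Chars.rfind.go]; split_ifs; · omega
                 · exact ih

theorem rfind_ge (cs : List Char) : -1 ≤ PySem.Chars.rfind cs ['/'] := by
  unfold PySem.Chars.rfind; exact go_ge_neg_one cs ['/'] cs.length

-- ===== VERDICT (by name: the statement is the Claim_ definition above) =====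
theorem cutToName_spec : Claim_equal_cutToName := by
  intro s _
  unfold Spec_cutToName cutToName cutToName_alt
  apply String.toList_inj.mp
  simp only [PySem.Str.toList_slice, PySem.Str.rfind_eq, String.toList_ofList]
  rw [show ("/" : String).toList = ['/'] from rfl]
  congr 1
  rw [loop_eq_rfind, PySem.Chars.slice_eq_listSlice,
      PySem.List.slice_from _ (by have := rfind_ge s.toList; omega)]
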